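-- pv_equiv track=rewrite | github.com/DevIA05/flaxib_codingame | Hexagonal_Maze_part2/function.py | mazeStrToList
-- ===== SOURCE A (Python) =====
-- def mazeStrToList(maze_str:str, width:int, heigth:int):
--     maze_list: list = []  # will contain the elements composing the maze taking into account the hexagonal aspect
--     count:     int  = 0   # browse the elements in maze_str
--     ligne:     list = []  # will contain the elements on a length of width taking into account the hexagonal aspect
--     letter:    dict[str, tuple[int,int]] = {}  # stores entry, exit, keys and doors
--     for h in range(0, heigth):
--         for w in range(0, width):
--             if(h%2 == 0):
--                 if(w == width-1): ligne.extend([maze_str[count], "#"]);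
--                 else:
--                     if(maze_str[count] == "#" or maze_str[count+1] == "#"): ligne.extend([maze_str[count], "#"]);
--                     else: ligne.extend([maze_str[count], "0"]);
--                 W = w*2      # position in the horizontal axis in maze_list
--             else:
--                 if(w==0): ligne.extend(['#', maze_str[count]]);
--                 else:
--                     if(maze_str[count] == "#" or maze_str[count-1] == "#" ): ligne.extend(["#", maze_str[count]]);
--                     else: ligne.extend(['0', maze_str[count]]);
--                 W = (w*2)+1  # position in the horizontal axis in maze_list
--             letter = saveLetter(n=(h,W), ch=maze_str[count], letter=letter)
--             count += 1 # moves to the next element in the maze_str object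
--         maze_list.append(ligne)
--         ligne = []
--     return maze_list, letter
--
-- def saveLetter(n, ch, letter):
--     if(ch.isalpha()):
--         if(ch in letter.keys()): letter[ch].append(n) # if there is the same door at different coordinates
--         else: letter[ch] = [n]
--     return letter
-- ===== SOURCE B (Python) =====
-- def mazeStrToList(maze_str: str, width: int, heigth: int):
--     # Pass 1: build the hexagonal grid row by row from string slices.
--     maze_list = []
--     for h in range(heigth):
--         row = maze_str[h * width:(h + 1) * width]
--         cells = []
--         if h % 2 == 0:
--             for w in range(width):
--                 ch = row[w]
--                 wall = w == width - 1 or ch == "#" or row[w + 1] == "#"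
--                 cells += [ch, "#" if wall else "0"]
--         else:
--             for w in range(width):
--                 ch = row[w]
--                 wall = w == 0 or ch == "#" or row[w - 1] == "#"
--                 cells += ["#" if wall else "0", ch]
--         maze_list.append(cells)
--     # Pass 2: read the letter positions off the finished grid.
--     letter = {}
--     for h, cells in enumerate(maze_list):
--         for W, ch in enumerate(cells):
--             if ch.isalpha():
--                 letter.setdefault(ch, []).append((h, W))
--     return maze_list, letter
-- ===== Notes on version B (the rewrite author's own statement) =====
-- stated objective: simpler
-- what changed: B separates the work into two passes: it first builds the grid from per-row string slices using a single boolean wall test per cell, then derives the letter-position table by scanning the finished grid, instead of A's single interleaved loop that tracks a running character counter and updates the letter dict via a helper inside the grid-building loop.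
import Mathlib
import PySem

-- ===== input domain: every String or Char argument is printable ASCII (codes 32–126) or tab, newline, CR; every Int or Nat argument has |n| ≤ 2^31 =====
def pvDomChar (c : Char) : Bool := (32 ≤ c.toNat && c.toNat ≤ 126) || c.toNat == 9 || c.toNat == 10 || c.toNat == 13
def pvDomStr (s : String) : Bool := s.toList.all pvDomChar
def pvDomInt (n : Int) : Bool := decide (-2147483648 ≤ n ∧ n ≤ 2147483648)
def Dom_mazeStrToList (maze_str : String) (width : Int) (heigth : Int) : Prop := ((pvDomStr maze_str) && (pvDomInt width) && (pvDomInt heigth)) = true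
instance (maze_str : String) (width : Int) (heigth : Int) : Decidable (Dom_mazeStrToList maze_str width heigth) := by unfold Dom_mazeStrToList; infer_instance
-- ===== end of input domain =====

-- B builds the grid in a first pass (per-row string slices, a boolean wall test) and derives the
-- letter-position table in a second pass over the finished grid; objective: simpler decomposition.

abbrev pvDict := PySem.Dict String (List (Int × Int))

-- ===== PORT A =====
def pvA_saveLetter (n : Int × Int) (ch : Char) (letter : pvDict) : pvDict :=
  if PySem.Chars.isalpha ch then
    if letter.contains (String.ofList [ch]) then
      letter.modify (String.ofList [ch]) [] (fun v => v ++ [n])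
    else letter.insert (String.ofList [ch]) [n]
  else letter

def pvA_step (cs : List Char) (width : Int) (h : Int)
    (st : List String × Int × pvDict) (w : Int) : List String × Int × pvDict :=
  let c := (PySem.List.pyGet? cs st.2.1).getD ' '
  let pr : List String × Int :=
    if PySem.Int.mod h 2 == 0 then
      if w == width - 1 then (st.1 ++ [String.ofList [c], "#"], w * 2)
      else if c == '#' || (PySem.List.pyGet? cs (st.2.1 + 1)).getD ' ' == '#' then
        (st.1 ++ [String.ofList [c], "#"], w * 2)
      else (st.1 ++ [String.ofList [c], "0"], w * 2)
    else
      if w == 0 then (st.1 ++ ["#", String.ofList [c]], w * 2 + 1)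
      else if c == '#' || (PySem.List.pyGet? cs (st.2.1 - 1)).getD ' ' == '#' then
        (st.1 ++ ["#", String.ofList [c]], w * 2 + 1)
      else (st.1 ++ ["0", String.ofList [c]], w * 2 + 1)
  (pr.1, st.2.1 + 1, pvA_saveLetter (h, pr.2) c st.2.2)

def mazeStrToList (maze_str : String) (width : Int) (heigth : Int) :
    List (List String) × (List (String × List (Int × Int))) :=
  let cs := maze_str.toList
  let res := (PySem.List.pyRange 0 heigth).foldl
    (fun (st : List (List String) × Int × pvDict) h =>
      let inner := (PySem.List.pyRange 0 width).foldl (pvA_step cs width h) ([], st.2.1, st.2.2)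
      (st.1 ++ [inner.1], inner.2.1, inner.2.2))
    ([], 0, PySem.Dict.empty)
  (res.1, res.2.2.items)

-- ===== PORT B =====
def pvB_row (cs : List Char) (width : Int) (h : Int) : List String :=
  let row := PySem.List.slice cs (some (h * width)) (some ((h + 1) * width))
  if PySem.Int.mod h 2 == 0 then
    (PySem.List.pyRange 0 width).foldl (fun cells w =>
      let ch := (PySem.List.pyGet? row w).getD ' '
      let wall := w == width - 1 || ch == '#' || (PySem.List.pyGet? row (w + 1)).getD ' ' == '#'
      cells ++ [String.ofList [ch], if wall then "#" else "0"]) []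
  else
    (PySem.List.pyRange 0 width).foldl (fun cells w =>
      let ch := (PySem.List.pyGet? row w).getD ' '
      let wall := w == 0 || ch == '#' || (PySem.List.pyGet? row (w - 1)).getD ' ' == '#'
      cells ++ [if wall then "#" else "0", String.ofList [ch]]) []

def pvB_letterRow (h : Int) (cells : List String) (d : pvDict) : pvDict :=
  (PySem.List.enumerate cells 0).foldl
    (fun d q => if PySem.Str.strIsalpha q.2 then d.modify q.2 [] (fun v => v ++ [(h, q.1)]) else d) d

def mazeStrToList_alt (maze_str : String) (width : Int) (heigth : Int) :
    List (List String) × (List (String × List (Int × Int))) :=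
  let cs := maze_str.toList
  let maze_list := (PySem.List.pyRange 0 heigth).foldl (fun acc h => acc ++ [pvB_row cs width h]) []
  let letter := (PySem.List.enumerate maze_list 0).foldl
    (fun d p => pvB_letterRow p.1 p.2 d) PySem.Dict.empty
  (maze_list, letter.items)

-- ===== PRECONDITION & SPEC =====
-- Pre_ excludes exactly the inputs where A raises IndexError: positive dimensions with a maze
-- string shorter than width*heigth.
def Pre_mazeStrToList (maze_str : String) (width : Int) (heigth : Int) : Prop :=
  heigth ≤ 0 ∨ width ≤ 0 ∨ width * heigth ≤ (maze_str.toList.length : Int)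
instance (maze_str : String) (width : Int) (heigth : Int) : Decidable (Pre_mazeStrToList maze_str width heigth) := by unfold Pre_mazeStrToList; infer_instance

def pvWitness_mazeStrToList : String × Int × Int := ("a#cD", 2, 2)

def Spec_mazeStrToList (maze_str : String) (width : Int) (heigth : Int)
    (out : List (List String) × (List (String × List (Int × Int)))) : Prop :=
  out = mazeStrToList_alt maze_str width heigth
instance (maze_str : String) (width : Int) (heigth : Int) (out : List (List String) × (List (String × List (Int × Int)))) : Decidable (Spec_mazeStrToList maze_str width heigth out) := by unfold Spec_mazeStrToList; infer_instance

-- ===== CLAIM =====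
def Claim_equal_mazeStrToList : Prop := ∀ (maze_str : String) (width : Int) (heigth : Int), Dom_mazeStrToList maze_str width heigth → Pre_mazeStrToList maze_str width heigth → Spec_mazeStrToList maze_str width heigth (mazeStrToList maze_str width heigth)

-- ===== LEMMAS AND PROOFS =====

-- canonical per-cell chunk / per-cell letter update, both indexed straight into the string
def pvChunk (cs : List Char) (width h w : Int) : List String :=
  let c := (PySem.List.pyGet? cs (h * width + w)).getD ' '
  if PySem.Int.mod h 2 == 0 then
    [String.ofList [c],
     if w == width - 1 || c == '#' || (PySem.List.pyGet? cs (h * width + w + 1)).getD ' ' == '#'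
     then "#" else "0"]
  else
    [if w == 0 || c == '#' || (PySem.List.pyGet? cs (h * width + w - 1)).getD ' ' == '#'
     then "#" else "0", String.ofList [c]]

def pvUpd (cs : List Char) (width h w : Int) (d : pvDict) : pvDict :=
  let c := (PySem.List.pyGet? cs (h * width + w)).getD ' '
  if PySem.Chars.isalpha c then
    d.modify (String.ofList [c]) [] (fun v => v ++ [(h, if PySem.Int.mod h 2 == 0 then w * 2 else w * 2 + 1)])
  else d

def pvCells (cs : List Char) (width h : Int) : List String :=
  (PySem.List.pyRange 0 width).flatMap (pvChunk cs width h)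

def pvDRow (cs : List Char) (width h : Int) (d : pvDict) : pvDict :=
  (PySem.List.pyRange 0 width).foldl (fun d w => pvUpd cs width h w d) d

lemma pv_saveLetter_eq (n : Int × Int) (c : Char) (d : pvDict) :
    pvA_saveLetter n c d =
      if PySem.Chars.isalpha c then d.modify (String.ofList [c]) [] (fun v => v ++ [n]) else d := by
  unfold pvA_saveLetter
  by_cases hc : PySem.Chars.isalpha c
  · simp only [hc, if_true]
    by_cases hk : d.contains (String.ofList [c])
    · simp [hk]
    · simp only [Bool.not_eq_true] at hk
      simp [hk, PySem.Dict.modify, PySem.Dict.getD_of_not_contains (h := hk)]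
  · simp [hc]

lemma pv_stepA_eq (cs : List Char) (width h w : Int) (L : List String) (d : pvDict) :
    pvA_step cs width h (L, h * width + w, d) w
      = (L ++ pvChunk cs width h w, h * width + w + 1, pvUpd cs width h w d) := by
  by_cases hp : (2 : Int) ∣ h <;>
  by_cases hw : (w == width - 1) = true <;>
  by_cases hz : (w == (0 : Int)) = true <;>
  by_cases hc : (((PySem.List.pyGet? cs (h * width + w)).getD ' ') == '#') = true <;>
  by_cases hn : (((PySem.List.pyGet? cs (h * width + w + 1)).getD ' ') == '#') = true <;>
  by_cases hb : (((PySem.List.pyGet? cs (h * width + w - 1)).getD ' ') == '#') = true <;>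
  simp [pvA_step, pvChunk, pvUpd, pv_saveLetter_eq, hp, hw, hz, hc, hn, hb]

lemma pv_chunk_len (cs : List Char) (width h w : Int) : (pvChunk cs width h w).length = 2 := by
  by_cases hp : (2 : Int) ∣ h <;> simp [pvChunk, hp]

lemma pv_rowA (cs : List Char) (width h : Int) :
    ∀ (k : ℕ), (k : Int) ≤ width → ∀ (d : pvDict),
      (PySem.List.pyRange 0 (k : Int)).foldl (pvA_step cs width h) ([], h * width, d)
        = ((PySem.List.pyRange 0 (k : Int)).flatMap (pvChunk cs width h),
           h * width + k,
           (PySem.List.pyRange 0 (k : Int)).foldl (fun d w => pvUpd cs width h w d) d) := by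
  intro k
  induction k with
  | zero =>
    intro _ d
    simp [PySem.List.pyRange_one_eq_nil (le_refl (0 : Int))]
  | succ k ih =>
    intro hk d
    have hk' : (k : Int) ≤ width := by push_cast at hk ⊢; omega
    have hcast : ((k + 1 : ℕ) : Int) = (k : Int) + 1 := by push_cast; ring
    rw [hcast, PySem.List.pyRange_one_succ_right (by positivity)]
    rw [List.foldl_append, List.flatMap_append, List.foldl_append]
    rw [ih hk']
    simp only [List.foldl_cons, List.foldl_nil, List.flatMap_cons, List.flatMap_nil,
      List.append_nil]
    rw [pv_stepA_eq]
    simp [Prod.ext_iff]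
    omega

lemma pv_flat_len (cs : List Char) (width h : Int) :
    ∀ (k : ℕ), ((PySem.List.pyRange 0 (k : Int)).flatMap (pvChunk cs width h)).length = 2 * k := by
  intro k
  induction k with
  | zero => simp [PySem.List.pyRange_one_eq_nil (le_refl (0 : Int))]
  | succ k ih =>
    have hcast : ((k + 1 : ℕ) : Int) = (k : Int) + 1 := by push_cast; ring
    rw [hcast, PySem.List.pyRange_one_succ_right (by positivity), List.flatMap_append]
    simp [ih, pv_chunk_len]
    omega

lemma pv_chunkFold (cs : List Char) (width h w : Int) (d : pvDict) :
    (PySem.List.enumerate (pvChunk cs width h w) (w * 2)).foldl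
      (fun d q => if PySem.Str.strIsalpha q.2 then d.modify q.2 [] (fun v => v ++ [(h, q.1)]) else d) d
      = pvUpd cs width h w d := by
  by_cases hp : (2 : Int) ∣ h <;>
    simp only [pvChunk, pvUpd] <;>
    split_ifs <;>
    simp_all [PySem.List.enumerate_cons, PySem.List.enumerate_nil, PySem.Str.strIsalpha,
      PySem.Chars.strIsalpha, (by decide : PySem.Chars.isalpha '#' = false),
      (by decide : PySem.Chars.isalpha '0' = false)]

lemma pv_lrow_aux (cs : List Char) (width h : Int) :
    ∀ (k : ℕ) (d : pvDict),
      pvB_letterRow h ((PySem.List.pyRange 0 (k : Int)).flatMap (pvChunk cs width h)) d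
        = (PySem.List.pyRange 0 (k : Int)).foldl (fun d w => pvUpd cs width h w d) d := by
  intro k
  induction k with
  | zero => intro d; simp [pvB_letterRow, PySem.List.pyRange_one_eq_nil (le_refl (0 : Int))]
  | succ k ih =>
    intro d
    have hcast : ((k + 1 : ℕ) : Int) = (k : Int) + 1 := by push_cast; ring
    rw [hcast, PySem.List.pyRange_one_succ_right (by positivity), List.flatMap_append]
    unfold pvB_letterRow
    rw [PySem.List.enumerate_append, List.foldl_append]
    have hlen : ((0 : Int) + ↑((PySem.List.pyRange 0 (k : Int)).flatMap (pvChunk cs width h)).length)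
        = (k : Int) * 2 := by
      rw [pv_flat_len]; push_cast; ring
    rw [hlen]
    simp only [List.flatMap_cons, List.flatMap_nil, List.append_nil]
    rw [pv_chunkFold]
    rw [List.foldl_append]
    simp only [List.foldl_cons, List.foldl_nil]
    exact congrArg _ (ih d)

lemma pv_letterRow_eq (cs : List Char) (width h : Int) (hw : 0 ≤ width) (d : pvDict) :
    pvB_letterRow h (pvCells cs width h) d = pvDRow cs width h d := by
  have hrw : width = ((width.toNat : ℕ) : Int) := (Int.toNat_of_nonneg hw).symm
  unfold pvCells pvDRow
  rw [hrw]
  exact pv_lrow_aux cs _ h width.toNat d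

lemma pv_flatMap_congr {α β : Type} (l : List α) (f g : α → List β)
    (h : ∀ x ∈ l, f x = g x) : l.flatMap f = l.flatMap g := by
  induction l with
  | nil => rfl
  | cons x xs ih =>
    simp only [List.flatMap_cons]
    rw [h x (by simp), ih (fun y hy => h y (by simp [hy]))]

lemma pv_idx (cs : List Char) (width h w : Int) (h0 : 0 ≤ h) (hw0 : 0 ≤ w) (hww : w < width)
    (hlen : (h + 1) * width ≤ (cs.length : Int)) :
    PySem.List.pyGet? (PySem.List.slice cs (some (h * width)) (some ((h + 1) * width))) w
      = PySem.List.pyGet? cs (h * width + w) := by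
  have hW : 0 < width := lt_of_le_of_lt hw0 hww
  have hab : h * width + width = (h + 1) * width := by ring
  have ha0 : 0 ≤ h * width := mul_nonneg h0 hW.le
  have hb0 : 0 ≤ (h + 1) * width := by omega
  have haL : h * width ≤ (cs.length : Int) := by omega
  rw [PySem.List.slice_of_nonneg cs ha0 hb0 haL hlen]
  rw [PySem.List.pyGet?_of_nonneg _ hw0, PySem.List.pyGet?_of_nonneg _ (by omega)]
  rw [List.getElem?_take, if_pos (by omega), List.getElem?_drop]
  congr 1
  omega

lemma pv_rowB (cs : List Char) (width h : Int) (h0 : 0 ≤ h)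
    (hlen : (h + 1) * width ≤ (cs.length : Int)) :
    pvB_row cs width h = pvCells cs width h := by
  unfold pvB_row pvCells
  by_cases hp : (PySem.Int.mod h 2 == 0) = true <;>
    [simp only [hp, if_true]; simp only [hp, Bool.false_eq_true, if_false]] <;>
    rw [PySem.List.foldl_append_eq_flatMap] <;>
    rw [List.nil_append] <;>
    refine pv_flatMap_congr _ _ _ (fun w hmem => ?_) <;>
    rw [PySem.List.mem_pyRange_one] at hmem <;>
    obtain ⟨hw0, hww⟩ := hmem <;>
    simp only [pvChunk, hp, if_true, Bool.false_eq_true, if_false, eq_self_iff_true] <;>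
    rw [show PySem.List.pyGet? cs (h * width + w)
        = PySem.List.pyGet? (PySem.List.slice cs (some (h * width)) (some ((h + 1) * width))) w
      from (pv_idx cs width h w h0 hw0 hww hlen).symm]
  · by_cases hlast : w = width - 1
    · simp [hlast]
    · have e1 : h * width + w + 1 = h * width + (w + 1) := by ring
      rw [e1, ← pv_idx cs width h (w + 1) h0 (by omega) (by omega) hlen]
  · by_cases hfirst : w = 0
    · simp [hfirst]
    · have e1 : h * width + w - 1 = h * width + (w - 1) := by ring
      rw [e1, ← pv_idx cs width h (w - 1) h0 (by omega) (by omega) hlen]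

lemma pv_range_toNat (n : Int) :
    PySem.List.pyRange 0 n = PySem.List.pyRange 0 ((n.toNat : ℕ) : Int) := by
  by_cases hn : 0 ≤ n
  · rw [Int.toNat_of_nonneg hn]
  · have h0 : n.toNat = 0 := Int.toNat_of_nonpos (by omega)
    rw [h0, PySem.List.pyRange_one_eq_nil (by omega), PySem.List.pyRange_one_eq_nil (by simp)]

lemma pv_outerA (cs : List Char) (width : Int) (hW : 0 ≤ width) :
    ∀ (k : ℕ),
      (PySem.List.pyRange 0 (k : Int)).foldl
        (fun (st : List (List String) × Int × pvDict) h =>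
          let inner := (PySem.List.pyRange 0 width).foldl (pvA_step cs width h) ([], st.2.1, st.2.2)
          (st.1 ++ [inner.1], inner.2.1, inner.2.2))
        ([], 0, PySem.Dict.empty)
      = ((PySem.List.pyRange 0 (k : Int)).map (pvCells cs width), (k : Int) * width,
         (PySem.List.pyRange 0 (k : Int)).foldl (fun d h => pvDRow cs width h d) PySem.Dict.empty) := by
  intro k
  induction k with
  | zero => simp [PySem.List.pyRange_one_eq_nil (le_refl (0 : Int))]
  | succ k ih =>
    have hcast : ((k + 1 : ℕ) : Int) = (k : Int) + 1 := by push_cast; ring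
    rw [hcast, PySem.List.pyRange_one_succ_right (by positivity)]
    rw [List.foldl_append, List.map_append, List.foldl_append, ih]
    simp only [List.foldl_cons, List.foldl_nil, List.map_cons, List.map_nil]
    try dsimp only
    rw [pv_range_toNat width]
    rw [pv_rowA cs width (k : Int) width.toNat (by omega)]
    try dsimp only
    rw [← pv_range_toNat width]
    simp only [pvCells, pvDRow, Prod.mk.injEq]
    refine ⟨trivial, ?_, trivial⟩
    have hwn : ((width.toNat : ℕ) : Int) = width := Int.toNat_of_nonneg hW
    rw [hwn]
    ring

lemma pv_letterAll (cs : List Char) (width : Int) (hW : 0 ≤ width) :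
    ∀ (k : ℕ) (d : pvDict),
      (PySem.List.enumerate ((PySem.List.pyRange 0 (k : Int)).map (pvCells cs width)) 0).foldl
        (fun d p => pvB_letterRow p.1 p.2 d) d
      = (PySem.List.pyRange 0 (k : Int)).foldl (fun d h => pvDRow cs width h d) d := by
  intro k
  induction k with
  | zero => intro d; simp [PySem.List.pyRange_one_eq_nil (le_refl (0 : Int))]
  | succ k ih =>
    intro d
    have hcast : ((k + 1 : ℕ) : Int) = (k : Int) + 1 := by push_cast; ring
    rw [hcast, PySem.List.pyRange_one_succ_right (by positivity), List.map_append]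
    rw [PySem.List.enumerate_append, List.foldl_append, List.foldl_append, ih]
    have hlen : ((PySem.List.pyRange 0 (k : Int)).map (pvCells cs width)).length = k := by
      simp [PySem.List.length_pyRange_one]
    rw [hlen]
    simp only [List.map_cons, List.map_nil, PySem.List.enumerate_cons, PySem.List.enumerate_nil,
      List.foldl_cons, List.foldl_nil, zero_add]
    exact pv_letterRow_eq cs width (k : Int) hW _

lemma pv_rowB_neg (cs : List Char) (width h : Int) (hW : width < 0) :
    pvB_row cs width h = [] := by
  by_cases hp : (PySem.Int.mod h 2 == 0) = true <;>
    simp [pvB_row, hp, PySem.List.pyRange_one_eq_nil hW.le]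

lemma pv_neg_outerA (cs : List Char) (width : Int) (hW : width < 0) :
    ∀ (l : List Int) (R : List (List String)) (c : Int) (d : pvDict),
      l.foldl
        (fun (st : List (List String) × Int × pvDict) h =>
          let inner := (PySem.List.pyRange 0 width).foldl (pvA_step cs width h) ([], st.2.1, st.2.2)
          (st.1 ++ [inner.1], inner.2.1, inner.2.2))
        (R, c, d)
      = (R ++ l.map (fun _ => []), c, d) := by
  intro l
  induction l with
  | nil => intro R c d; simp
  | cons x xs ih =>
    intro R c d
    simp only [List.foldl_cons, PySem.List.pyRange_one_eq_nil hW.le, List.foldl_nil] at ih ⊢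
    rw [ih]
    simp

lemma pv_neg_letterB :
    ∀ (rows : List (List String)) (s : Int) (d : pvDict), (∀ r ∈ rows, r = []) →
      (PySem.List.enumerate rows s).foldl (fun d p => pvB_letterRow p.1 p.2 d) d = d := by
  intro rows
  induction rows with
  | nil => intro s d _; simp [PySem.List.enumerate_nil]
  | cons r rs ih =>
    intro s d hr
    rw [PySem.List.enumerate_cons, List.foldl_cons]
    rw [hr r (by simp)]
    simpa [pvB_letterRow, PySem.List.enumerate_nil] using ih (s + 1) d (fun x hx => hr x (by simp [hx]))

-- ===== VERDICT =====
theorem mazeStrToList_spec : Claim_equal_mazeStrToList := by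
  intro maze_str width heigth _ hpre
  unfold Spec_mazeStrToList
  by_cases hW : 0 ≤ width
  case pos => -- main case: 0 ≤ width
    have Hlen : ∀ h : Int, 0 ≤ h → h < heigth → (h + 1) * width ≤ ((maze_str.toList.length : ℕ) : Int) := by
      intro h h0 hh
      rcases hpre with hp | hp | hp
      · omega
      · have : width = 0 := le_antisymm hp hW
        simp [this]
      · calc (h + 1) * width ≤ heigth * width := by
              exact mul_le_mul_of_nonneg_right (by omega) hW
          _ = width * heigth := by ring
          _ ≤ _ := hp
    simp only [mazeStrToList, mazeStrToList_alt]
    rw [PySem.List.foldl_append_singleton_eq_map, List.nil_append]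
    rw [show List.map (pvB_row maze_str.toList width) (PySem.List.pyRange 0 heigth)
        = List.map (pvCells maze_str.toList width) (PySem.List.pyRange 0 heigth) from
      List.map_congr_left (fun h hm => by
        rw [PySem.List.mem_pyRange_one] at hm
        exact pv_rowB maze_str.toList width h hm.1 (Hlen h hm.1 hm.2))]
    rw [pv_range_toNat heigth]
    rw [pv_outerA maze_str.toList width hW heigth.toNat]
    rw [pv_letterAll maze_str.toList width hW heigth.toNat]
  · -- degenerate case: width < 0 (the maze rows are empty)
    have hWn : width < 0 := by omega
    simp only [mazeStrToList, mazeStrToList_alt]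
    rw [pv_neg_outerA maze_str.toList width hWn _ [] 0 PySem.Dict.empty]
    rw [PySem.List.foldl_append_singleton_eq_map, List.nil_append]
    rw [show List.map (pvB_row maze_str.toList width) (PySem.List.pyRange 0 heigth)
        = List.map (fun _ => ([] : List String)) (PySem.List.pyRange 0 heigth) from
      List.map_congr_left (fun h _ => pv_rowB_neg maze_str.toList width h hWn)]
    simp only [List.nil_append]
    rw [pv_neg_letterB (List.map (fun _ => ([] : List String)) (PySem.List.pyRange 0 heigth))
      0 PySem.Dict.empty (by
        intro r hr
        simp only [List.mem_map] at hr
        obtain ⟨x, -, hx⟩ := hr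
        exact hx.symm)]
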